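-- pv_equiv track=rewrite | github.com/strawgate/fastforward-bench | tests/e2e/lib/oracle.py | count_order_violations
-- ===== SOURCE A (Python) =====
-- from typing import Any
--
-- def count_order_violations(rows: list[dict[str, Any]], order_key: str, source_key: str | None) -> int:
--     order_violations = 0
--     last_seen: dict[str, Any] = {}
--     for row in rows:
--         current = row.get(order_key)
--         if current is None:
--             continue
--         source = str(row.get(source_key)) if source_key else "__global__"
--         if source in last_seen and current < last_seen[source]:
--             order_violations += 1
--         last_seen[source] = current
--     return order_violations
-- ===== SOURCE B (Python) =====
-- def count_order_violations(rows, order_key, source_key):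
--     # Phase 1: group the non-None order values per source, in encounter order.
--     groups = {}
--     for row in rows:
--         current = row.get(order_key)
--         if current is None:
--             continue
--         source = str(row.get(source_key)) if source_key else "__global__"
--         groups.setdefault(source, []).append(current)
--     # Phase 2: count adjacent descents inside each group.
--     total = 0
--     for seq in groups.values():
--         for prev, cur in zip(seq, seq[1:]):
--             if cur < prev:
--                 total += 1
--     return total
-- ===== Notes on version B (the rewrite author's own statement) =====
-- stated objective: alternative
-- what changed: Single pass maintaining a last-seen-value dict is replaced by a two-phase decomposition: first group values per source into lists, then count adjacent descents in each group.
import Mathlib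
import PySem

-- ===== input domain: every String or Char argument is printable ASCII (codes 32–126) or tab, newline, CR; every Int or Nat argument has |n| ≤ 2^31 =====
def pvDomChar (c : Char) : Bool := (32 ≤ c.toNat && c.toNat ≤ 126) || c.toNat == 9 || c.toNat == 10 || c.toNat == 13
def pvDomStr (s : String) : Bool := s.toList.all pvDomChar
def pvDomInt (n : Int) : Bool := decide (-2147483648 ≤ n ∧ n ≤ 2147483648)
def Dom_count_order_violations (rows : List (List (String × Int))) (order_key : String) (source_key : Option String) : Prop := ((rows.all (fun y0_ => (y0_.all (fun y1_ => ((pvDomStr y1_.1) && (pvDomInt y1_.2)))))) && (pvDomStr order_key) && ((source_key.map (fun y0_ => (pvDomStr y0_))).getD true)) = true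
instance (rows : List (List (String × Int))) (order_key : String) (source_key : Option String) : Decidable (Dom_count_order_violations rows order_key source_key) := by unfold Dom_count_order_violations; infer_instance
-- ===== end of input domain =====

-- B replaces A's single-pass last-seen dict with a two-phase decomposition: group values per source, then count adjacent descents per group.


-- shared helpers: row.get(k) on a dict-as-assoc-list (first match), and the source string
def pvRowGet (row : List (String × Int)) (k : String) : Option Int := List.lookup k row

def pvSrc (row : List (String × Int)) (source_key : Option String) : String :=
  match source_key with
  | none => "__global__"
  | some sk =>
    if sk = "" then "__global__"   -- Python: empty string is falsy
    else match pvRowGet row sk with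
         | some v => PySem.Int.toStr v
         | none => "None"          -- str(None)

-- ===== PORT A =====
def pvStepA (order_key : String) (source_key : Option String)
    (st : Int × PySem.Dict String Int) (row : List (String × Int)) : Int × PySem.Dict String Int :=
  match pvRowGet row order_key with
  | none => st
  | some current =>
    let source := pvSrc row source_key
    let n : Int :=
      match st.2.get? source with   -- 'source in last_seen and current < last_seen[source]'
      | some prev => if current < prev then st.1 + 1 else st.1
      | none => st.1
    (n, st.2.insert source current)

def count_order_violations (rows : List (List (String × Int))) (order_key : String) (source_key : Option String) : Int :=
  (rows.foldl (pvStepA order_key source_key) (0, PySem.Dict.empty)).1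

-- ===== PORT B =====
def pvStepB (order_key : String) (source_key : Option String)
    (g : PySem.Dict String (List Int)) (row : List (String × Int)) : PySem.Dict String (List Int) :=
  match pvRowGet row order_key with
  | none => g
  | some current => g.modify (pvSrc row source_key) [] (· ++ [current])   -- setdefault(source, []).append(current)

def pvDescents : List Int → Int
  | a :: b :: t => (if b < a then 1 else 0) + pvDescents (b :: t)
  | _ => 0

def count_order_violations_alt (rows : List (List (String × Int))) (order_key : String) (source_key : Option String) : Int :=
  ((rows.foldl (pvStepB order_key source_key) PySem.Dict.empty).values.map pvDescents).sum

-- ===== PRECONDITION & SPEC =====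
def Spec_count_order_violations (rows : List (List (String × Int))) (order_key : String) (source_key : Option String) (out : Int) : Prop := out = count_order_violations_alt rows order_key source_key
instance (rows : List (List (String × Int))) (order_key : String) (source_key : Option String) (out : Int) : Decidable (Spec_count_order_violations rows order_key source_key out) := by unfold Spec_count_order_violations; infer_instance

-- ===== CLAIM (what is proved, stated in full; the proofs are below) =====
def Claim_equal_count_order_violations : Prop := ∀ (rows : List (List (String × Int))) (order_key : String) (source_key : Option String), Dom_count_order_violations rows order_key source_key → Spec_count_order_violations rows order_key source_key (count_order_violations rows order_key source_key)

-- ===== LEMMAS AND PROOFS =====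

-- sum of descents over a group dict, keyed form
def pvS (g : PySem.Dict String (List Int)) : Int :=
  (g.keys.map (fun k => pvDescents (g.getD k []))).sum

lemma pvDescents_append (l : List Int) (x : Int) :
    pvDescents (l ++ [x]) = pvDescents l +
      (match l.getLast? with | some a => if x < a then (1 : Int) else 0 | none => 0) := by
  induction l with
  | nil => simp [pvDescents]
  | cons a t ih =>
    cases t with
    | nil => simp [pvDescents]
    | cons b t' =>
      simp only [List.cons_append, pvDescents] at ih ⊢
      rw [ih]
      simp [List.getLast?_cons_cons]
      ring

lemma pv_sum_map_update (l : List String) (F G : String → Int) (s : String)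
    (hnd : l.Nodup) (hmem : s ∈ l) (hG : ∀ k ∈ l, k ≠ s → G k = F k) :
    (l.map G).sum = (l.map F).sum + (G s - F s) := by
  induction l with
  | nil => cases hmem
  | cons a t ih =>
    simp only [List.map_cons, List.sum_cons]
    have hnda := (List.nodup_cons.mp hnd).1
    have hndt := (List.nodup_cons.mp hnd).2
    rcases List.mem_cons.mp hmem with h | h
    · subst h
      have : t.map G = t.map F := by
        apply List.map_congr_left
        intro k hk
        exact hG k (List.mem_cons_of_mem _ hk) (fun he => hnda (by rw [← he]; exact hk))
      rw [this]; ring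
    · have ha : a ≠ s := fun he => hnda (by rw [he]; exact h)
      rw [hG a List.mem_cons_self ha,
          ih hndt h (fun k hk => hG k (List.mem_cons_of_mem _ hk))]
      ring

lemma pv_nodup_foldB (order_key : String) (source_key : Option String) :
    ∀ (rows : List (List (String × Int))) (g : PySem.Dict String (List Int)),
      g.keys.Nodup → (rows.foldl (pvStepB order_key source_key) g).keys.Nodup := by
  intro rows
  induction rows with
  | nil => intro g h; simpa using h
  | cons row rest ih =>
    intro g h
    simp only [List.foldl_cons]
    apply ih
    unfold pvStepB
    cases pvRowGet row order_key with
    | none => exact h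
    | some current =>
      rw [PySem.Dict.keys_modify]
      exact PySem.Dict.nodup_keys_insert _ _ _ h

lemma pvS_modify (g : PySem.Dict String (List Int)) (s : String) (x : Int)
    (hnd : g.keys.Nodup) :
    pvS (g.modify s [] (· ++ [x])) = pvS g +
      (match (g.getD s []).getLast? with | some a => if x < a then (1 : Int) else 0 | none => 0) := by
  unfold pvS
  cases hc : g.contains s with
  | true =>
    have hkeys : (g.modify s [] (· ++ [x])).keys = g.keys := by
      rw [PySem.Dict.keys_modify, PySem.Dict.keys_insert_of_contains _ _ hc]
    rw [hkeys]
    rw [pv_sum_map_update g.keys (fun k => pvDescents (g.getD k []))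
        (fun k => pvDescents ((g.modify s [] (· ++ [x])).getD k [])) s hnd
        ((PySem.Dict.contains_iff_mem_keys g s).mp hc)
        (fun k _ hk => congrArg pvDescents (PySem.Dict.getD_modify_of_ne _ _ _ hk))]
    rw [PySem.Dict.getD_modify_self, pvDescents_append]
    ring
  | false =>
    have hkeys : (g.modify s [] (· ++ [x])).keys = g.keys ++ [s] := by
      rw [PySem.Dict.keys_modify, PySem.Dict.keys_insert_of_not_contains _ _ hc]
    have hsmem : s ∉ g.keys := fun h => by
      rw [(PySem.Dict.contains_iff_mem_keys g s).mpr h] at hc; cases hc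
    have hget : g.getD s [] = [] := PySem.Dict.getD_of_not_contains _ _ hc
    rw [hkeys, List.map_append, List.sum_append]
    have hmap : g.keys.map (fun k => pvDescents ((g.modify s [] (· ++ [x])).getD k []))
        = g.keys.map (fun k => pvDescents (g.getD k [])) := by
      apply List.map_congr_left
      intro k hk
      have hk' : k ≠ s := fun he => hsmem (by rw [← he]; exact hk)
      exact congrArg pvDescents (PySem.Dict.getD_modify_of_ne _ _ _ hk')
    rw [hmap, hget]
    simp [PySem.Dict.getD_modify_self, hget, pvDescents]

-- main invariant lemma
lemma pv_main (order_key : String) (source_key : Option String) :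
    ∀ (rows : List (List (String × Int))) (n : Int) (last : PySem.Dict String Int)
      (g : PySem.Dict String (List Int)),
      g.keys.Nodup →
      (∀ s, last.get? s = (g.getD s []).getLast?) →
      (rows.foldl (pvStepA order_key source_key) (n, last)).1 + pvS g
        = n + pvS (rows.foldl (pvStepB order_key source_key) g) := by
  intro rows
  induction rows with
  | nil => intro n last g _ _; simp
  | cons row rest ih =>
    intro n last g hnd hinv
    rw [List.foldl_cons, List.foldl_cons]
    cases hrg : pvRowGet row order_key with
    | none =>
      have hA : pvStepA order_key source_key (n, last) row = (n, last) := by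
        simp [pvStepA, hrg]
      have hB : pvStepB order_key source_key g row = g := by
        simp [pvStepB, hrg]
      rw [hA, hB]
      exact ih n last g hnd hinv
    | some current =>
      set s := pvSrc row source_key with hs
      have hA : pvStepA order_key source_key (n, last) row =
          ((match last.get? s with
            | some prev => if current < prev then n + 1 else n
            | none => n), last.insert s current) := by
        simp [pvStepA, hrg, ← hs]
      have hB : pvStepB order_key source_key g row = g.modify s [] (· ++ [current]) := by
        simp [pvStepB, hrg, ← hs]
      have hnd' : (g.modify s [] (· ++ [current])).keys.Nodup := by
        rw [PySem.Dict.keys_modify]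
        exact PySem.Dict.nodup_keys_insert _ _ _ hnd
      have hinv' : ∀ t, (last.insert s current).get? t
          = ((g.modify s [] (· ++ [current])).getD t []).getLast? := by
        intro t
        by_cases ht : t = s
        · subst ht
          rw [PySem.Dict.get?_insert_self, PySem.Dict.getD_modify_self]
          simp
        · rw [PySem.Dict.get?_insert_of_ne _ _ ht, PySem.Dict.getD_modify_of_ne _ _ _ ht, hinv t]
      rw [hA, hB]
      have hih := ih (match last.get? s with
          | some prev => if current < prev then n + 1 else n
          | none => n) (last.insert s current) (g.modify s [] (· ++ [current])) hnd' hinv'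
      have hSm := pvS_modify g s current hnd
      rw [hinv s] at hih ⊢
      cases hgl : (g.getD s []).getLast? with
      | none =>
        simp only [hgl] at hih hSm ⊢
        omega
      | some prev =>
        by_cases hlt : current < prev <;>
          simp only [hgl, hlt, if_true, if_false] at hih hSm ⊢ <;> omega

-- ===== VERDICT (by name: the statement is the Claim_ definition above) =====
theorem count_order_violations_spec : Claim_equal_count_order_violations := by
  intro rows order_key source_key _
  unfold Spec_count_order_violations count_order_violations count_order_violations_alt
  have h := pv_main order_key source_key rows 0 PySem.Dict.empty PySem.Dict.empty
    (by simp [PySem.Dict.keys_empty]) (by intro s; simp [PySem.Dict.get?_empty, PySem.Dict.getD_empty])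
  have hS0 : pvS (PySem.Dict.empty : PySem.Dict String (List Int)) = 0 := by
    simp [pvS, PySem.Dict.keys_empty]
  rw [hS0] at h
  have hnd : (rows.foldl (pvStepB order_key source_key) PySem.Dict.empty).keys.Nodup :=
    pv_nodup_foldB order_key source_key rows _ PySem.Dict.nodup_keys_empty
  have hvals : ((rows.foldl (pvStepB order_key source_key) PySem.Dict.empty).values.map pvDescents).sum
      = pvS (rows.foldl (pvStepB order_key source_key) PySem.Dict.empty) := by
    rw [PySem.Dict.values_eq_map_keys _ hnd []]
    simp [pvS, Function.comp_def]
  omega
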